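-- pv_equiv track=rewrite | github.com/shiyan688/Lyapunov_create | test.py | sequence_to_equation
-- ===== SOURCE A (Python) =====
-- class ExpressionParser:
--     def __init__(self, tokens):
--         self.tokens = tokens
--         self.position = 0
--
--     def parse(self):
--         return self.parse_expression()
--
--     def parse_expression(self):
--         if self.position >= len(self.tokens):
--             return None
--
--         token = self.tokens[self.position]
--         if token == '*':
--             self.position += 1
--             left = self.parse_expression()
--             right = self.parse_expression()
--             return f"({left} * {right})"
--         elif token == '+':
--             self.position += 1
--             left = self.parse_expression()
--             right = self.parse_expression()
--             return f"({left} + {right})"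
--         elif token == 'cos' or token == 'sin':
--             self.position += 1
--             argument = self.parse_expression()
--             return f"{token}({argument})"
--         else:
--             # Assuming token is a number or variable
--             self.position += 1
--             return token
--
-- def sequence_to_equation(sequence):
--     equations = []
--     while 'SEP' in sequence:
--         sep_index = sequence.index('SEP')
--         sub_sequence = sequence[:sep_index]
--         parser = ExpressionParser(sub_sequence)
--         equations.append(parser.parse())
--         sequence = sequence[sep_index + 1:]
--     # Parse the remaining sequence after the last SEP
--     if sequence:
--         parser = ExpressionParser(sequence)
--         equations.append(parser.parse())
--     return "\n".join(equations)
-- ===== SOURCE B (Python) =====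
-- def sequence_to_equation(sequence):
--     def parse_expr(toks):
--         # returns (text, remaining_tokens); functional recursive-descent parser
--         if not toks:
--             return None, toks
--         t, rest = toks[0], toks[1:]
--         if t == '*' or t == '+':
--             left, rest = parse_expr(rest)
--             right, rest = parse_expr(rest)
--             return f"({left} {t} {right})", rest
--         if t == 'cos' or t == 'sin':
--             arg, rest = parse_expr(rest)
--             return f"{t}({arg})", rest
--         return t, rest
--
--     lines = []
--     segment = []
--     for tok in sequence:
--         if tok == 'SEP':
--             lines.append(parse_expr(segment)[0])
--             segment = []
--         else:
--             segment.append(tok)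
--     if segment:
--         lines.append(parse_expr(segment)[0])
--     return "\n".join(lines)
-- ===== Notes on version B (the rewrite author's own statement) =====
-- stated objective: alternative
-- what changed: A repeatedly searches for 'SEP' with list.index and re-slices the remaining list, parsing each piece with a class that mutates a position cursor; B makes one pass over the tokens accumulating the current segment and parses each segment with a pure functional recursive-descent parser that returns the unconsumed remainder.
import Mathlib
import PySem

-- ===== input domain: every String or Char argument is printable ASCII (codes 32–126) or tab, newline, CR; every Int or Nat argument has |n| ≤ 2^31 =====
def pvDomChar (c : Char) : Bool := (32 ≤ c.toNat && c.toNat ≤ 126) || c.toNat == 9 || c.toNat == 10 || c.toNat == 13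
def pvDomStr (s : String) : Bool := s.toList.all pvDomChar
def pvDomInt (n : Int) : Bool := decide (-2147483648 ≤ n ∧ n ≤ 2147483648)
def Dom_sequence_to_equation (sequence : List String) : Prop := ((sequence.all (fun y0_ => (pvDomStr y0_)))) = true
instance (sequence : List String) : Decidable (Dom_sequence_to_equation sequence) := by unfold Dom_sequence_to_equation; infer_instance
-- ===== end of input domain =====

-- B replaces A's repeated list.index search + re-slicing of the remainder by one pass that
-- accumulates the current segment, and A's mutable-position parser class by a pure
-- recursive-descent parser returning the unconsumed remainder (alternative structure).

-- str(x) for x an Option String coming from parse_expression (Python renders None as "None")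
def pvOptStr (o : Option String) : String := o.getD "None"

-- ===== PORT A =====
-- ExpressionParser.parse_expression: tokens fixed, mutable self.position threaded through;
-- fuel only makes the recursion total (tokens.length + 1 suffices: position grows each level).
def parseExprA (fuel : Nat) (tokens : List String) (pos : Nat) : Option String × Nat :=
  match fuel with
  | 0 => (none, pos)
  | f + 1 =>
    if tokens.length ≤ pos then (none, pos)
    else
      let token := tokens.getD pos ""
      if token = "*" then
        let l := parseExprA f tokens (pos + 1)
        let r := parseExprA f tokens l.2
        (some ("(" ++ pvOptStr l.1 ++ " * " ++ pvOptStr r.1 ++ ")"), r.2)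
      else if token = "+" then
        let l := parseExprA f tokens (pos + 1)
        let r := parseExprA f tokens l.2
        (some ("(" ++ pvOptStr l.1 ++ " + " ++ pvOptStr r.1 ++ ")"), r.2)
      else if token = "cos" ∨ token = "sin" then
        let a := parseExprA f tokens (pos + 1)
        (some (token ++ "(" ++ pvOptStr a.1 ++ ")"), a.2)
      else (some token, pos + 1)

-- the while-'SEP'-in-sequence loop; returns (equations, remaining sequence)
def loopA (sequence : List String) (equations : List String) : List String × List String :=
  if h : "SEP" ∈ sequence then
    match PySem.List.index? sequence "SEP" with
    | some sepIndex =>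
        let subSeq := sequence.take sepIndex
        loopA (sequence.drop (sepIndex + 1))
          (equations ++ [pvOptStr (parseExprA (subSeq.length + 1) subSeq 0).1])
    | none => (equations, sequence)
  else (equations, sequence)
termination_by sequence.length
decreasing_by
  have hne : sequence ≠ [] := by rintro rfl; simp at h
  have hp : 0 < sequence.length := List.length_pos_iff.mpr hne
  simp [List.length_drop]; omega

def sequence_to_equation (sequence : List String) : String :=
  let st := loopA sequence []
  let equations :=
    if st.2 ≠ [] then st.1 ++ [pvOptStr (parseExprA (st.2.length + 1) st.2 0).1]
    else st.1
  PySem.Str.join "\n" equations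

-- ===== PORT B =====
-- pure parser: (text, remaining tokens); fuel only makes the recursion total
def parseExprB (fuel : Nat) (toks : List String) : Option String × List String :=
  match fuel with
  | 0 => (none, toks)
  | f + 1 =>
    match toks with
    | [] => (none, [])
    | t :: rest =>
      if t = "*" ∨ t = "+" then
        let l := parseExprB f rest
        let r := parseExprB f l.2
        (some ("(" ++ pvOptStr l.1 ++ " " ++ t ++ " " ++ pvOptStr r.1 ++ ")"), r.2)
      else if t = "cos" ∨ t = "sin" then
        let a := parseExprB f rest
        (some (t ++ "(" ++ pvOptStr a.1 ++ ")"), a.2)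
      else (some t, rest)

-- one step of B's single pass: acc = (lines, current segment)
def stepB (acc : List String × List String) (tok : String) : List String × List String :=
  if tok = "SEP" then
    (acc.1 ++ [pvOptStr (parseExprB (acc.2.length + 1) acc.2).1], [])
  else (acc.1, acc.2 ++ [tok])

def sequence_to_equation_alt (sequence : List String) : String :=
  let st := sequence.foldl stepB ([], [])
  let lines :=
    if st.2 ≠ [] then st.1 ++ [pvOptStr (parseExprB (st.2.length + 1) st.2).1]
    else st.1
  PySem.Str.join "\n" lines

-- ===== PRECONDITION & SPEC =====
-- Pre_ excludes exactly the inputs on which A raises TypeError ('\n'.join over a None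
-- produced by parsing an empty segment): a 'SEP' at position 0 or immediately after
-- another 'SEP'.  (B raises there too.)
def Pre_sequence_to_equation (sequence : List String) : Prop :=
  ∀ i, i < sequence.length → sequence.getD i "" = "SEP" →
    0 < i ∧ sequence.getD (i - 1) "" ≠ "SEP"
instance (sequence : List String) : Decidable (Pre_sequence_to_equation sequence) := by
  unfold Pre_sequence_to_equation; infer_instance

def pvWitness_sequence_to_equation : List String :=
  ["+", "x", "y", "SEP", "cos", "z", "SEP", "t"]

def Spec_sequence_to_equation (sequence : List String) (out : String) : Prop := out = sequence_to_equation_alt sequence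
instance (sequence : List String) (out : String) : Decidable (Spec_sequence_to_equation sequence out) := by unfold Spec_sequence_to_equation; infer_instance

-- ===== CLAIM (what is proved, stated in full; the proofs are below) =====
def Claim_equal_sequence_to_equation : Prop := ∀ (sequence : List String), Dom_sequence_to_equation sequence → Pre_sequence_to_equation sequence → Spec_sequence_to_equation sequence (sequence_to_equation sequence)

-- ===== LEMMAS AND PROOFS =====

-- the two parsers agree: A at (tokens, pos) simulates B on the suffix tokens.drop pos
theorem parse_agree (fuel : Nat) :
    ∀ (tokens : List String) (pos : Nat), pos ≤ tokens.length →
      (parseExprA fuel tokens pos).1 = (parseExprB fuel (tokens.drop pos)).1 ∧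
      (parseExprA fuel tokens pos).2
        = tokens.length - (parseExprB fuel (tokens.drop pos)).2.length ∧
      tokens.drop (parseExprA fuel tokens pos).2 = (parseExprB fuel (tokens.drop pos)).2 := by
  induction fuel with
  | zero =>
    intro tokens pos h
    refine ⟨by simp [parseExprA, parseExprB], ?_, by simp [parseExprA, parseExprB]⟩
    simp [parseExprA, parseExprB]; omega
  | succ f ih =>
    intro tokens pos hpos
    by_cases hlt : tokens.length ≤ pos
    · have hpe : pos = tokens.length := le_antisymm hpos hlt
      subst hpe
      simp [parseExprA, parseExprB, List.drop_of_length_le hlt]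
    · push_neg at hlt
      have hdrop : tokens.drop pos = tokens[pos]?.getD "" :: tokens.drop (pos + 1) := by
        rw [List.drop_eq_getElem_cons hlt]
        simp [List.getElem?_eq_getElem hlt]
      have h1 := ih tokens (pos + 1) (by omega)
      obtain ⟨hl1, hl2, hl3⟩ := h1
      have hlen2 : (parseExprA f tokens (pos + 1)).2 ≤ tokens.length := by omega
      have h2 := ih tokens (parseExprA f tokens (pos + 1)).2 hlen2
      obtain ⟨hr1, hr2, hr3⟩ := h2
      rw [hl3] at hr1 hr2 hr3
      rw [hl2] at hr1 hr2 hr3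
      rw [hr2] at hr3
      rw [hl2] at hl3
      by_cases hstar : tokens[pos]?.getD "" = "*"
      · refine ⟨?_, ?_, ?_⟩ <;>
          simp [parseExprA, parseExprB, hdrop, hstar, hl1, hl2, hr1, hr2, hr3,
            Nat.not_le.mpr hlt, String.append_assoc]
      · by_cases hplus : tokens[pos]?.getD "" = "+"
        · refine ⟨?_, ?_, ?_⟩ <;>
            simp [parseExprA, parseExprB, hdrop, hstar, hplus, hl1, hl2, hr1, hr2, hr3,
              Nat.not_le.mpr hlt, String.append_assoc]
        · by_cases htrig : tokens[pos]?.getD "" = "cos" ∨ tokens[pos]?.getD "" = "sin"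
          · rcases htrig with hc | hc <;>
              (refine ⟨?_, ?_, ?_⟩ <;>
                simp [parseExprA, parseExprB, hdrop, hc, hl1, hl2, hl3, hstar, hplus,
                  Nat.not_le.mpr hlt, String.append_assoc])
          · have hcos : ¬ tokens[pos]?.getD "" = "cos" := fun h => htrig (Or.inl h)
            have hsin : ¬ tokens[pos]?.getD "" = "sin" := fun h => htrig (Or.inr h)
            refine ⟨?_, ?_, ?_⟩ <;>
              simp [parseExprA, parseExprB, hdrop, hstar, hplus, hcos, hsin,
                Nat.not_le.mpr hlt] <;> omega

-- same fuel, same list: A's parse of a standalone segment equals B's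
theorem parse_agree_zero (fuel : Nat) (toks : List String) :
    (parseExprA fuel toks 0).1 = (parseExprB fuel toks).1 := by
  have h := parse_agree fuel toks 0 (Nat.zero_le _)
  simpa using h.1

-- B's fold on a SEP-free chunk only extends the segment
theorem foldl_stepB_no_sep (chunk : List String) (hn : "SEP" ∉ chunk) :
    ∀ lines seg, chunk.foldl stepB (lines, seg) = (lines, seg ++ chunk) := by
  induction chunk with
  | nil => simp
  | cons t rest ih =>
    intro lines seg
    have ht : t ≠ "SEP" := fun h => hn (h ▸ List.mem_cons_self ..)
    have hr : "SEP" ∉ rest := fun h => hn (List.mem_cons_of_mem _ h)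
    simp [List.foldl_cons, stepB, ht, ih hr, List.append_assoc]

-- B's single pass computes exactly A's while-loop state
theorem fold_eq_loopA_aux (n : Nat) :
    ∀ (sequence : List String), sequence.length ≤ n →
      ∀ equations, sequence.foldl stepB (equations, []) = loopA sequence equations := by
  induction n with
  | zero =>
    intro sequence hlen equations
    have : sequence = [] := List.eq_nil_of_length_eq_zero (Nat.le_zero.mp hlen)
    subst this
    rw [loopA, dif_neg (by simp)]
    simp
  | succ n ih =>
    intro sequence hlen equations
    by_cases hmem : "SEP" ∈ sequence
    · have hsome : (PySem.List.index? sequence "SEP").isSome =  true :=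
        (PySem.List.index?_isSome_iff sequence "SEP").mpr hmem
      obtain ⟨i, hidx⟩ := Option.isSome_iff_exists.mp hsome
      obtain ⟨pre, suf, hseq, hlen_pre, hnot⟩ := (PySem.List.index?_eq_some_iff sequence "SEP" i).mp hidx
      rw [loopA, dif_pos hmem, hidx]
      subst hseq
      have htake : (pre ++ "SEP" :: suf).take i = pre := List.take_left' hlen_pre
      have hsplit : pre ++ "SEP" :: suf = (pre ++ ["SEP"]) ++ suf := by simp
      have hdropseq : (pre ++ "SEP" :: suf).drop (i + 1) = suf := by
        rw [hsplit]
        exact List.drop_left' (by simp [hlen_pre])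
      have hsuf : suf.length ≤ n := by
        have := hlen
        simp [List.length_append] at this
        omega
      dsimp only
      rw [htake, hdropseq]
      calc (pre ++ "SEP" :: suf).foldl stepB (equations, [])
          = suf.foldl stepB (((pre ++ ["SEP"]).foldl stepB (equations, []))) := by
            rw [hsplit, List.foldl_append]
        _ = suf.foldl stepB
              (equations ++ [pvOptStr (parseExprB (pre.length + 1) pre).1], []) := by
            rw [List.foldl_append, foldl_stepB_no_sep pre hnot]
            simp [stepB]
        _ = loopA suf (equations ++ [pvOptStr (parseExprA (pre.length + 1) pre 0).1]) := by
            rw [parse_agree_zero]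
            exact ih suf hsuf _
    · rw [loopA, dif_neg hmem]
      exact foldl_stepB_no_sep sequence hmem equations []

theorem fold_eq_loopA (sequence : List String) (equations : List String) :
    sequence.foldl stepB (equations, []) = loopA sequence equations :=
  fold_eq_loopA_aux sequence.length sequence le_rfl equations

-- ===== VERDICT (by name: the statement is the Claim_ definition above) =====
theorem sequence_to_equation_spec : Claim_equal_sequence_to_equation := by
  intro sequence _ _
  unfold Spec_sequence_to_equation sequence_to_equation sequence_to_equation_alt
  rw [fold_eq_loopA sequence []]
  dsimp only
  rw [parse_agree_zero]
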